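-- pv_equiv track=rewrite | github.com/ElianaHarriet/TDA | aproximaciones.py | elegir_proveedores
-- ===== SOURCE A (Python) =====
-- def filtrar_proveedores(lista_productos, dict_proveedores): # O(n + m) -> ya que recorre todos los productos y proveedores
--     proveedores_filtrados = {}
--     for proveedor, productos in dict_proveedores.items():
--         for producto in productos:
--             if producto in lista_productos:
--                 proveedores_filtrados[proveedor] = proveedores_filtrados.get(proveedor, set()) | {producto}
--     return proveedores_filtrados
--
-- def mas_importante(dict_proveedores): # O(n + m) -> ya que recorre todos los productos y proveedores
--     proveedor_mas_importante = None
--     productos_mas_importante = set()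
--     for proveedor, productos in dict_proveedores.items():
--         if len(productos) > len(productos_mas_importante):
--             proveedor_mas_importante = proveedor
--             productos_mas_importante = productos
--     return proveedor_mas_importante
--
-- def elegir_proveedores(lista_productos, dict_proveedores): # O(n * (n + m)) -> O(n^2 + n * m)
--     proveedores = set()
--
--     productos_restantes = set(lista_productos)
--     proveedores_filtrados = filtrar_proveedores(lista_productos, dict_proveedores)
--     while len(productos_restantes) > 0: # Como mucho se recorre n veces
--         proveedor = mas_importante(proveedores_filtrados) # O(n + m)
--         proveedores.add(proveedor)
--         productos_restantes -= proveedores_filtrados[proveedor]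
--         del proveedores_filtrados[proveedor]
--         proveedores_filtrados = filtrar_proveedores(productos_restantes, proveedores_filtrados) # O(n + m)
--     return proveedores
-- ===== SOURCE B (Python) =====
-- def elegir_proveedores(lista_productos, dict_proveedores):
--     # Lazy greedy: build each provider's relevant offer once, keep candidates in a
--     # list sorted by (-count, index); pop the best, and if its count is stale,
--     # refresh it and reinsert instead of rescanning every provider each round.
--     objetivo = set(lista_productos)
--     cand = []
--     for i, (proveedor, productos) in enumerate(dict_proveedores.items()):
--         oferta = {p for p in productos if p in objetivo}
--         if oferta:
--             cand.append((-len(oferta), i, proveedor, oferta))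
--     cand.sort()
--     pendientes = set(lista_productos)
--     elegidos = set()
--     while pendientes:
--         if not cand:
--             raise ValueError("hay productos sin proveedor")
--         negc, i, proveedor, oferta = cand.pop(0)
--         actual = len(oferta & pendientes)
--         if actual == -negc:
--             # stored priority is current: this is the provider covering the most
--             elegidos.add(proveedor)
--             pendientes -= oferta
--         elif actual > 0:
--             # stale: reinsert with the refreshed count, keeping the list sorted
--             entry = (-actual, i, proveedor, oferta)
--             j = 0
--             while j < len(cand) and cand[j] < entry:
--                 j += 1
--             cand.insert(j, entry)
--         # actual == 0: the provider adds nothing any more; drop it for good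
--     return elegidos
-- ===== Notes on version B (the rewrite author's own statement) =====
-- stated objective: alternative
-- what changed: B is a lazy greedy: it builds each provider's relevant offer once, sorts candidates by (-coverage, index) into a priority list, and each round pops the best candidate, refreshing and reinserting stale counts, instead of A's per-round rebuild of a filtered dict plus a full scan for the maximum.
import Mathlib
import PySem

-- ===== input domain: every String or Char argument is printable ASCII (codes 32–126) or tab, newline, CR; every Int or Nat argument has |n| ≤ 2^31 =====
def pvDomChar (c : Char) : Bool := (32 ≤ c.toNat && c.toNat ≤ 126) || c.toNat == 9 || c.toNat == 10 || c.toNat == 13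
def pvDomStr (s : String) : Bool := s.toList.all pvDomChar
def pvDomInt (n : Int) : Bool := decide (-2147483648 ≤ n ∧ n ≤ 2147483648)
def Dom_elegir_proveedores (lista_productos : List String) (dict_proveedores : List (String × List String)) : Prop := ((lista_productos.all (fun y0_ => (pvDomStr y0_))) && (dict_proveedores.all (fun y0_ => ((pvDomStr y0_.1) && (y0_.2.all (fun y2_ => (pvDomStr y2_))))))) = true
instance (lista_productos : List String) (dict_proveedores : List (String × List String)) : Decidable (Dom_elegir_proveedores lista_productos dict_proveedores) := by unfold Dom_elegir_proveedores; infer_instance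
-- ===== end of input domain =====

-- B is a lazy greedy: offers are computed once and kept in a list sorted by
-- (-count, index), popping the best and reinserting refreshed stale counts,
-- instead of A's per-round rebuild of a filtered dict plus a full max-scan.

-- ===== PORT A =====
def filtrar_proveedores (lista_productos : List String)
    (dict_proveedores : PySem.Dict String (List String)) : PySem.Dict String (List String) :=
  dict_proveedores.items.foldl (fun acc pr =>
    pr.2.foldl (fun acc producto =>
      if producto ∈ lista_productos then
        acc.insert pr.1 (PySem.Set.union (acc.getD pr.1 PySem.Set.empty) [producto])
      else acc) acc) PySem.Dict.empty

def mas_importante (dict_proveedores : PySem.Dict String (List String)) : Option String :=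
  (dict_proveedores.items.foldl
    (fun (st : Option String × List String) pr =>
      if pr.2.length > st.2.length then (some pr.1, pr.2) else st)
    (none, PySem.Set.empty)).1

-- the while-loop; fuel (#distinct products + 1) only makes it total, each pass removes a product
def elegirA_loop : Nat → PySem.Set String → PySem.Set String →
    PySem.Dict String (List String) → PySem.Set String
  | 0, proveedores, _, _ => proveedores
  | fuel+1, proveedores, restantes, filtrados =>
    if restantes.length > 0 then
      match mas_importante filtrados with
      | none => proveedores          -- Python raises KeyError here (outside Pre_)
      | some proveedor =>
        match filtrados.get? proveedor with
        | none => PySem.Set.add proveedores proveedor   -- unreachable: proveedor is a key of filtrados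
        | some cubiertos =>
          elegirA_loop fuel (PySem.Set.add proveedores proveedor)
            (PySem.Set.diff restantes cubiertos)
            (filtrar_proveedores (PySem.Set.diff restantes cubiertos) (filtrados.erase proveedor))
    else proveedores

def elegir_proveedores (lista_productos : List String) (dict_proveedores : List (String × List String)) : List String :=
  elegirA_loop ((PySem.Set.ofList lista_productos).length + 1) PySem.Set.empty
    (PySem.Set.ofList lista_productos)
    (filtrar_proveedores lista_productos (PySem.Dict.mk dict_proveedores))

-- ===== PORT B =====
-- Python's tuple comparison `cand[j] < entry` only ever inspects the
-- (-count, index) prefix (the enumerate indices are pairwise distinct), so it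
-- is ported as the lexicographic order on the first two components (exact there).
def pvLtEnt (a b : Int × Int × String × List String) : Bool :=
  a.1 < b.1 || (a.1 == b.1 && a.2.1 < b.2.1)

-- the `while j < len(cand) and cand[j] < entry ... cand.insert(j, entry)` of Source B
def pvInsertCand (e : Int × Int × String × List String) :
    List (Int × Int × String × List String) → List (Int × Int × String × List String)
  | [] => [e]
  | x :: t => if pvLtEnt x e then x :: pvInsertCand e t else e :: x :: t

-- the `while pendientes` loop of Source B; fuel only makes it total: every Python
-- iteration strictly decreases (sum of stored counts) + |pendientes|
def elegirB_loop : Nat → List (Int × Int × String × List String) →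
    PySem.Set String → PySem.Set String → PySem.Set String
  | 0, _, elegidos, _ => elegidos
  | fuel+1, cand, elegidos, pendientes =>
    if pendientes.isEmpty then elegidos
    else
      match cand with
      | [] => elegidos        -- Source B raises ValueError here (outside Pre_)
      | e :: rest =>
        let actual := (e.2.2.2.filter (fun p => PySem.Set.contains pendientes p)).length
        if (actual : Int) = -e.1 then
          elegirB_loop fuel rest (PySem.Set.add elegidos e.2.2.1)
            (PySem.Set.diff pendientes e.2.2.2)
        else if 0 < actual then
          elegirB_loop fuel (pvInsertCand (-(actual : Int), e.2.1, e.2.2.1, e.2.2.2) rest)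
            elegidos pendientes
        else
          elegirB_loop fuel rest elegidos pendientes

def elegir_proveedores_alt (lista_productos : List String) (dict_proveedores : List (String × List String)) : List String :=
  let objetivo := PySem.Set.ofList lista_productos
  let cand0 := (PySem.List.enumerate (PySem.Dict.mk dict_proveedores).items 0).foldl
    (fun acc pr =>
      if PySem.Set.ofList (pr.2.2.filter (fun p => PySem.Set.contains objetivo p)) ≠ [] then
        acc ++ [(-(((PySem.Set.ofList (pr.2.2.filter (fun p => PySem.Set.contains objetivo p))).length : Int)),
                 pr.1, pr.2.1,
                 PySem.Set.ofList (pr.2.2.filter (fun p => PySem.Set.contains objetivo p)))]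
      else acc) []
  -- cand0.sort(): Python's tuple order = lexicographic on the distinct (-count, index) prefix
  let cand := PySem.List.sorted cand0 (fun e => (toLex (e.1, e.2.1) : Int ×ₗ Int)) false
  elegirB_loop ((cand.map (fun e => (-e.1).toNat)).sum + (PySem.Set.ofList lista_productos).length + 1)
    cand PySem.Set.empty (PySem.Set.ofList lista_productos)

-- ===== PRECONDITION & SPEC =====
-- Pre_ excludes (a) inputs on which A raises KeyError (a requested product offered by no
-- provider) and (b) association lists with duplicate provider keys, which do not arise
-- from a Python dict argument.
def Pre_elegir_proveedores (lista_productos : List String) (dict_proveedores : List (String × List String)) : Prop :=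
  (dict_proveedores.map Prod.fst).Nodup ∧
  ∀ p ∈ lista_productos, ∃ pr ∈ dict_proveedores, p ∈ pr.2
instance (lista_productos : List String) (dict_proveedores : List (String × List String)) : Decidable (Pre_elegir_proveedores lista_productos dict_proveedores) := by
  unfold Pre_elegir_proveedores; infer_instance

def pvWitness_elegir_proveedores : List String × (List (String × List String)) :=
  (["a", "b"], [("x", ["a"]), ("y", ["b", "c"])])

def Spec_elegir_proveedores (lista_productos : List String) (dict_proveedores : List (String × List String)) (out : List String) : Prop :=
  out = elegir_proveedores_alt lista_productos dict_proveedores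
instance (lista_productos : List String) (dict_proveedores : List (String × List String)) (out : List String) : Decidable (Spec_elegir_proveedores lista_productos dict_proveedores out) := by
  unfold Spec_elegir_proveedores; infer_instance

-- ===== CLAIM (what is proved, stated in full; the proofs are below) =====
def Claim_equal_elegir_proveedores : Prop := ∀ (lista_productos : List String) (dict_proveedores : List (String × List String)), Dom_elegir_proveedores lista_productos dict_proveedores → Pre_elegir_proveedores lista_productos dict_proveedores → Spec_elegir_proveedores lista_productos dict_proveedores (elegir_proveedores lista_productos dict_proveedores)

-- ===== LEMMAS AND PROOFS =====

-- the value a filtered dict entry holds: the provider's products restricted to R (distinct, in order)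
def pvVal (R prods : List String) : List String :=
  PySem.Set.ofList (prods.filter (fun p => decide (p ∈ R)))

def pvF (R : List String) (pr : String × List String) : String × List String :=
  (pr.1, pvVal R pr.2)

@[simp] theorem pvF_fst (R : List String) (pr : String × List String) : (pvF R pr).1 = pr.1 := rfl

-- characterisation of A's filtered dict: unchosen providers in original order, nonempty restricted offers
def pvChar (l : List (String × List String)) (S R : List String) : List (String × List String) :=
  ((l.filter (fun pr => decide (pr.1 ∉ S))).map (pvF R)).filter (fun pr => decide (pr.2 ≠ []))

-- the abstract first-strict-max scan A's selection fold computes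
def pvScan (l : List (String × Nat)) (st : Option String × Nat) : Option String × Nat :=
  l.foldl (fun st q => if q.2 > st.2 then (some q.1, q.2) else st) st

theorem pvMem_pvVal (R prods : List String) (x : String) :
    x ∈ pvVal R prods ↔ x ∈ prods ∧ x ∈ R := by
  simp [pvVal, PySem.Set.mem_ofList, List.mem_filter]

theorem pvFilter_cons_pos {α : Type} (p : α → Bool) (a : α) (l : List α) (h : p a = true) :
    (a :: l).filter p = a :: l.filter p := by
  rw [List.filter_cons, if_pos h]

theorem pvFilter_cons_neg {α : Type} (p : α → Bool) (a : α) (l : List α) (h : p a = false) :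
    (a :: l).filter p = l.filter p := by
  rw [List.filter_cons, if_neg]
  intro hh
  rw [h] at hh
  exact Bool.false_ne_true hh

theorem pvAdd_filter (s : List String) (x : String) (p : String → Bool) :
    (PySem.Set.add s x).filter p = if p x then PySem.Set.add (s.filter p) x else s.filter p := by
  by_cases hx : x ∈ s
  · have h1 : PySem.Set.add s x = s := by
      simp [PySem.Set.add, hx]
    by_cases hp : p x
    · have h2 : PySem.Set.add (s.filter p) x = s.filter p := by
        simp [PySem.Set.add, List.mem_filter, hx, hp]
      simp [h1, hp, h2]
    · simp [h1, hp]
  · have h1 : PySem.Set.add s x = s ++ [x] := by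
      simp [PySem.Set.add, hx]
    have h2 : x ∉ s.filter p := fun hmem => hx (List.mem_of_mem_filter hmem)
    have h3 : PySem.Set.add (s.filter p) x = s.filter p ++ [x] := by
      simp [PySem.Set.add, h2]
    by_cases hp : p x
    · simp [h1, hp, h3, List.filter_append]
    · simp [h1, hp, List.filter_append]

theorem pvFoldAdd_filter (p : String → Bool) :
    ∀ (l s : List String),
      (l.foldl PySem.Set.add s).filter p = (l.filter p).foldl PySem.Set.add (s.filter p)
  | [], s => rfl
  | x :: t, s => by
    simp only [List.foldl_cons]
    rw [pvFoldAdd_filter p t (PySem.Set.add s x), pvAdd_filter]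
    by_cases hp : p x
    · simp [hp]
    · simp [hp]

theorem pvOfList_filter (l : List String) (p : String → Bool) :
    (PySem.Set.ofList l).filter p = PySem.Set.ofList (l.filter p) := by
  have := pvFoldAdd_filter p l []
  simpa [PySem.Set.ofList, PySem.Set.empty] using this

theorem pvVal_pvVal (R' R prods : List String) (h : ∀ x ∈ R', x ∈ R) :
    pvVal R' (pvVal R prods) = pvVal R' prods := by
  unfold pvVal
  rw [pvOfList_filter, PySem.Set.ofList_ofList, List.filter_filter]
  congr 1
  apply List.filter_congr
  intro x _
  by_cases hx : x ∈ R'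
  · simp [hx, h x hx]
  · simp [hx]

theorem pvVal_filter_sub (R' R prods : List String) (h : ∀ x ∈ R', x ∈ R) :
    pvVal R' prods = (pvVal R prods).filter (fun p => decide (p ∈ R')) := by
  unfold pvVal
  rw [pvOfList_filter, List.filter_filter]
  congr 1
  apply List.filter_congr
  intro x _
  by_cases hx : x ∈ R'
  · simp [hx, h x hx]
  · simp [hx]

theorem pvVal_len_mono (R' R prods : List String) (h : ∀ x ∈ R', x ∈ R) :
    (pvVal R' prods).length ≤ (pvVal R prods).length := by
  rw [pvVal_filter_sub R' R prods h]
  exact List.length_filter_le _ _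

theorem pvVal_nil_mono (R' R prods : List String) (h : ∀ x ∈ R', x ∈ R)
    (h0 : pvVal R prods = []) : pvVal R' prods = [] := by
  rw [pvVal_filter_sub R' R prods h, h0]
  rfl

theorem pvFilter_lt (l : List String) (p : String → Bool) (x : String)
    (hx : x ∈ l) (hp : p x = false) : (l.filter p).length < l.length := by
  refine Nat.lt_of_le_of_ne (l.filter_sublist.length_le) ?_
  intro h
  have heq := (l.filter_sublist (p := p)).eq_of_length h
  rw [← heq] at hx
  have := List.of_mem_filter hx
  simp [hp] at this

theorem pvChar_keys_sublist (l : List (String × List String)) (S R : List String) :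
    ((pvChar l S R).map Prod.fst).Sublist (l.map Prod.fst) := by
  unfold pvChar
  have h1 : ((((l.filter (fun pr => decide (pr.1 ∉ S))).map (pvF R)).filter
      (fun pr => decide (pr.2 ≠ []))).map Prod.fst).Sublist
      (((l.filter (fun pr => decide (pr.1 ∉ S))).map (pvF R)).map Prod.fst) :=
    (List.filter_sublist).map Prod.fst
  have h2 : ((l.filter (fun pr => decide (pr.1 ∉ S))).map (pvF R)).map Prod.fst
      = (l.filter (fun pr => decide (pr.1 ∉ S))).map Prod.fst := by
    rw [List.map_map]; rfl
  have h3 : ((l.filter (fun pr => decide (pr.1 ∉ S))).map Prod.fst).Sublist (l.map Prod.fst) :=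
    (List.filter_sublist).map Prod.fst
  exact (h2 ▸ h1).trans h3

theorem pvChar_keys_nodup (l : List (String × List String)) (S R : List String)
    (h : (l.map Prod.fst).Nodup) : ((pvChar l S R).map Prod.fst).Nodup :=
  h.sublist (pvChar_keys_sublist l S R)

-- ---- the dict-building fold of filtrar_proveedores ----

theorem pvUnion_singleton (s : List String) (p : String) :
    PySem.Set.union s [p] = PySem.Set.add s p := rfl

theorem pvInsert_self (d : PySem.Dict String (List String)) (k : String) (v : List String)
    (hnd : d.keys.Nodup) (h : d.get? k = some v) : d.insert k v = d := by
  have hc : d.contains k = true := by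
    rw [PySem.Dict.contains_eq_isSome_get?, h]; rfl
  apply PySem.Dict.ext
  rw [PySem.Dict.items_insert_of_contains d v hc]
  conv_rhs => rw [← List.map_id d.items]
  apply List.map_congr_left
  intro a ha
  by_cases hk : a.1 = k
  · have hbeq : (a.1 == k) = true := beq_iff_eq.2 hk
    rw [if_pos hbeq]
    have hmem : (a.1, a.2) ∈ d.items := by simpa using ha
    have h2 := PySem.Dict.get?_of_mem_items d hmem hnd
    rw [hk, h] at h2
    have hv : a.2 = v := (Option.some.inj h2).symm
    simp only [id_eq]
    exact ((Prod.ext_iff).2 ⟨hk, hv⟩).symm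
  · simp [hk, id_eq]

theorem pvInner_contains (k : String) (R : List String) :
    ∀ (prods : List String) (d : PySem.Dict String (List String)) (v : List String),
      d.keys.Nodup → d.get? k = some v →
      prods.foldl (fun acc producto =>
        if producto ∈ R then
          acc.insert k (PySem.Set.union (acc.getD k PySem.Set.empty) [producto])
        else acc) d
      = d.insert k ((prods.filter (fun p => decide (p ∈ R))).foldl PySem.Set.add v)
  | [], d, v, hnd, h => by
    simp only [List.foldl_nil, List.filter_nil]
    exact (pvInsert_self d k v hnd h).symm
  | p :: t, d, v, hnd, h => by
    by_cases hp : p ∈ R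
    · have hgd : d.getD k PySem.Set.empty = v := by
        rw [PySem.Dict.getD_eq_get?_getD, h]; rfl
      simp only [List.foldl_cons]
      rw [if_pos hp, hgd, pvUnion_singleton]
      rw [pvInner_contains k R t (d.insert k (PySem.Set.add v p)) (PySem.Set.add v p)
        (PySem.Dict.nodup_keys_insert d k _ hnd) (PySem.Dict.get?_insert_self d k _)]
      rw [PySem.Dict.insert_insert_self]
      simp [hp]
    · simp only [List.foldl_cons]
      rw [if_neg hp]
      rw [pvInner_contains k R t d v hnd h]
      simp [hp]

theorem pvNotContains_of_not_mem (d : PySem.Dict String (List String)) (k : String)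
    (h : k ∉ d.keys) : d.contains k = false := by
  cases hc : d.contains k
  · rfl
  · exact absurd ((PySem.Dict.contains_iff_mem_keys d k).1 hc) h

theorem pvInner_fresh (k : String) (R : List String) :
    ∀ (prods : List String) (d : PySem.Dict String (List String)),
      d.keys.Nodup → d.contains k = false →
      prods.foldl (fun acc producto =>
        if producto ∈ R then
          acc.insert k (PySem.Set.union (acc.getD k PySem.Set.empty) [producto])
        else acc) d
      = if (prods.filter (fun p => decide (p ∈ R))) = [] then d
        else PySem.Dict.mk (d.items ++ [(k, PySem.Set.ofList (prods.filter (fun p => decide (p ∈ R))))])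
  | [], d, _, _ => by simp
  | p :: t, d, hnd, hc => by
    by_cases hp : p ∈ R
    · have hgd : d.getD k PySem.Set.empty = PySem.Set.empty :=
        PySem.Dict.getD_of_not_contains d _ hc
      have hadd : PySem.Set.add (PySem.Set.empty : PySem.Set String) p = [p] := rfl
      simp only [List.foldl_cons]
      rw [if_pos hp, hgd, pvUnion_singleton, hadd]
      have hitems := PySem.Dict.items_insert_of_not_contains d [p] hc
      have hkeys : (d.insert k [p]).keys.Nodup := PySem.Dict.nodup_keys_insert d k _ hnd
      rw [pvInner_contains k R t (d.insert k [p]) [p] hkeys (PySem.Dict.get?_insert_self d k _)]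
      have hnomem : ∀ a ∈ d.items, (a.1 == k) = false := by
        intro a ha
        cases hbe : (a.1 == k)
        · rfl
        · exfalso
          have hmemk : a.1 ∈ d.keys := by
            have hkeq : d.keys = d.items.map Prod.fst := rfl
            rw [hkeq]
            exact List.mem_map.2 ⟨a, ha, rfl⟩
          rw [beq_iff_eq.1 hbe] at hmemk
          have hct := (PySem.Dict.contains_iff_mem_keys d k).2 hmemk
          rw [hc] at hct
          exact Bool.false_ne_true hct
      have hc2 : (d.insert k [p]).contains k = true := by
        rw [PySem.Dict.contains_eq_isSome_get?, PySem.Dict.get?_insert_self]; rfl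
      apply PySem.Dict.ext
      rw [PySem.Dict.items_insert_of_contains _ _ hc2, hitems]
      have hfil : (p :: t).filter (fun p => decide (p ∈ R)) = p :: t.filter (fun p => decide (p ∈ R)) := by
        simp [hp]
      rw [hfil]
      simp only [List.map_append]
      rw [if_neg (by simp)]
      have hofl : PySem.Set.ofList (p :: t.filter (fun p => decide (p ∈ R)))
          = (t.filter (fun p => decide (p ∈ R))).foldl PySem.Set.add [p] := rfl
      rw [hofl]
      congr 1
      · apply List.map_congr_left (fun a ha => by simp [hnomem a ha]) |>.trans (List.map_id _)
      · simp
    · simp only [List.foldl_cons, if_neg hp]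
      rw [pvInner_fresh k R t d hnd hc]
      simp [hp]

theorem pvOuter (R : List String) :
    ∀ (L : List (String × List String)) (acc : PySem.Dict String (List String)),
      acc.keys.Nodup → (∀ pr ∈ L, acc.contains pr.1 = false) → (L.map Prod.fst).Nodup →
      L.foldl (fun acc pr =>
        pr.2.foldl (fun acc producto =>
          if producto ∈ R then
            acc.insert pr.1 (PySem.Set.union (acc.getD pr.1 PySem.Set.empty) [producto])
          else acc) acc) acc
      = PySem.Dict.mk (acc.items ++ (L.map (pvF R)).filter (fun pr => decide (pr.2 ≠ [])))
  | [], acc, _, _, _ => by simp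
  | pr :: rest, acc, hnd, hfresh, hLnd => by
    simp only [List.foldl_cons]
    rw [pvInner_fresh pr.1 R pr.2 acc hnd (hfresh pr (List.mem_cons_self))]
    simp only [List.map_cons, List.nodup_cons] at hLnd
    by_cases hemp : pr.2.filter (fun p => decide (p ∈ R)) = []
    · rw [if_pos hemp]
      rw [pvOuter R rest acc hnd (fun q hq => hfresh q (List.mem_cons_of_mem _ hq)) hLnd.2]
      have : pvF R pr = (pr.1, []) := by
        simp [pvF, pvVal, hemp, PySem.Set.ofList]
      simp [this]
    · rw [if_neg hemp]
      set acc' := PySem.Dict.mk (acc.items ++ [(pr.1, PySem.Set.ofList (pr.2.filter (fun p => decide (p ∈ R))))]) with hacc'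
      have hkeys' : acc'.keys = acc.keys ++ [pr.1] := by
        show (acc.items ++ [(pr.1, _)]).map Prod.fst = acc.items.map Prod.fst ++ [pr.1]
        simp
      have hnd' : acc'.keys.Nodup := by
        rw [hkeys']
        have hpr1 : pr.1 ∉ acc.keys := by
          intro hmem
          have := (PySem.Dict.contains_iff_mem_keys acc pr.1).2 hmem
          rw [hfresh pr (List.mem_cons_self)] at this
          exact absurd this (by simp)
        rw [List.nodup_append]
        refine ⟨hnd, List.nodup_singleton _, ?_⟩
        intro a ha b hb
        have hb' : b = pr.1 := by simpa using hb
        subst hb'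
        intro h
        exact hpr1 (h ▸ ha)
      have hfresh' : ∀ q ∈ rest, acc'.contains q.1 = false := by
        intro q hq
        apply pvNotContains_of_not_mem
        rw [hkeys']
        intro hmem
        rcases List.mem_append.1 hmem with h | h
        · have := (PySem.Dict.contains_iff_mem_keys acc q.1).2 h
          rw [hfresh q (List.mem_cons_of_mem _ hq)] at this
          exact absurd this (by simp)
        · have hq1 : q.1 = pr.1 := by simpa using h
          exact hLnd.1 (hq1 ▸ List.mem_map.2 ⟨q, hq, rfl⟩)
      rw [pvOuter R rest acc' hnd' hfresh' hLnd.2]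
      apply PySem.Dict.ext
      show acc'.items ++ _ = acc.items ++ _
      have hacc'items : acc'.items = acc.items ++ [(pr.1, PySem.Set.ofList (pr.2.filter (fun p => decide (p ∈ R))))] := rfl
      rw [hacc'items, List.append_assoc]
      congr 1
      have hne : PySem.Set.ofList (pr.2.filter (fun p => decide (p ∈ R))) ≠ [] := by
        intro h0
        rcases List.exists_mem_of_ne_nil _ hemp with ⟨x, hx⟩
        have hx' : x ∈ PySem.Set.ofList (pr.2.filter (fun p => decide (p ∈ R))) :=
          (PySem.Set.mem_ofList _ _).2 hx
        rw [h0] at hx'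
        exact absurd hx' (List.not_mem_nil)
      rw [List.map_cons, pvFilter_cons_pos (fun pr => decide (pr.2 ≠ [])) (pvF R pr)
        (List.map (pvF R) rest) (decide_eq_true hne)]
      rfl

theorem pvFiltrar_items (R : List String) (L : List (String × List String))
    (h : (L.map Prod.fst).Nodup) :
    (filtrar_proveedores R (PySem.Dict.mk L)).items
      = (L.map (pvF R)).filter (fun pr => decide (pr.2 ≠ [])) := by
  have hempty : (PySem.Dict.empty : PySem.Dict String (List String)).keys.Nodup := by
    exact List.nodup_nil
  have hfresh : ∀ pr ∈ L, (PySem.Dict.empty : PySem.Dict String (List String)).contains pr.1 = false := by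
    intro pr _; rfl
  have := pvOuter R L PySem.Dict.empty hempty hfresh h
  unfold filtrar_proveedores
  rw [this]
  rfl

-- ---- the first-strict-max scan ----

theorem pvScan_cons (q : String × Nat) (M : List (String × Nat)) (st : Option String × Nat) :
    pvScan (q :: M) st = pvScan M (if q.2 > st.2 then (some q.1, q.2) else st) := rfl

theorem pvScan_all_le : ∀ (M : List (String × Nat)) (st : Option String × Nat),
    (∀ q ∈ M, q.2 ≤ st.2) → pvScan M st = st
  | [], _, _ => rfl
  | q :: t, st, h => by
    rw [pvScan_cons, if_neg (by
      have := h q (List.mem_cons_self)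
      omega)]
    exact pvScan_all_le t st (fun q' hq' => h q' (List.mem_cons_of_mem _ hq'))

theorem pvScan_first_max : ∀ (M₁ : List (String × Nat)) (a : String) (c : Nat)
    (M₂ : List (String × Nat)) (o : Option String) (m : Nat),
    (∀ q ∈ M₁, q.2 < c) → m < c → (∀ q ∈ M₂, q.2 ≤ c) →
    pvScan (M₁ ++ (a, c) :: M₂) (o, m) = (some a, c)
  | [], a, c, M₂, o, m, _, hm, h2 => by
    rw [List.nil_append, pvScan_cons, if_pos (by omega)]
    exact pvScan_all_le M₂ (some a, c) h2
  | q :: t, a, c, M₂, o, m, h1, hm, h2 => by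
    rw [List.cons_append, pvScan_cons]
    by_cases hq : q.2 > m
    · rw [if_pos hq]
      exact pvScan_first_max t a c M₂ (some q.1) q.2 (fun q' hq' => h1 q' (List.mem_cons_of_mem _ hq'))
        (h1 q (List.mem_cons_self)) h2
    · rw [if_neg hq]
      exact pvScan_first_max t a c M₂ o m (fun q' hq' => h1 q' (List.mem_cons_of_mem _ hq')) hm h2

theorem pvScan_skip (q : (String × List String) → Bool) (hm : (String × List String) → String × Nat) :
    ∀ (Y : List (String × List String)), (∀ pr ∈ Y, q pr = false → (hm pr).2 = 0) →
      ∀ st, pvScan ((Y.filter q).map hm) st = pvScan (Y.map hm) st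
  | [], _, st => rfl
  | y :: t, h, st => by
    cases hq : q y
    · have h0 : (hm y).2 = 0 := h y (List.mem_cons_self) hq
      rw [pvFilter_cons_neg q y t hq, List.map_cons, pvScan_cons, if_neg (by omega)]
      exact pvScan_skip q hm t (fun pr hpr => h pr (List.mem_cons_of_mem _ hpr)) st
    · rw [pvFilter_cons_pos q y t hq, List.map_cons, List.map_cons, pvScan_cons, pvScan_cons]
      exact pvScan_skip q hm t (fun pr hpr => h pr (List.mem_cons_of_mem _ hpr)) _

-- A's selection fold projects onto pvScan
theorem pvFoldA_proj : ∀ (items : List (String × List String)) (o : Option String) (s : List String),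
    (((items.foldl (fun (st : Option String × List String) pr =>
        if pr.2.length > st.2.length then (some pr.1, pr.2) else st) (o, s))).1,
     ((items.foldl (fun (st : Option String × List String) pr =>
        if pr.2.length > st.2.length then (some pr.1, pr.2) else st) (o, s))).2.length)
    = pvScan (items.map (fun pr => (pr.1, pr.2.length))) (o, s.length)
  | [], o, s => rfl
  | pr :: t, o, s => by
    simp only [List.foldl_cons, List.map_cons, pvScan, List.foldl_cons]
    by_cases h : pr.2.length > s.length
    · rw [if_pos h, if_pos h]
      exact pvFoldA_proj t (some pr.1) pr.2
    · rw [if_neg h, if_neg h]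
      exact pvFoldA_proj t o s

theorem pvCount (lista R prods : List String) (h : ∀ x ∈ R, x ∈ lista) :
    (pvVal lista prods).countP (fun p => PySem.Set.contains R p) = (pvVal R prods).length := by
  rw [List.countP_eq_length_filter]
  have : (pvVal lista prods).filter (fun p => PySem.Set.contains R p) = pvVal R prods := by
    unfold pvVal
    have hcongr : (PySem.Set.ofList (prods.filter (fun p => decide (p ∈ lista)))).filter
        (fun p => PySem.Set.contains R p)
        = (PySem.Set.ofList (prods.filter (fun p => decide (p ∈ lista)))).filter
        (fun p => decide (p ∈ R)) := by
      apply List.filter_congr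
      intro x _
      rw [PySem.Set.contains_eq_decide]
    rw [hcongr, pvOfList_filter, List.filter_filter]
    congr 1
    apply List.filter_congr
    intro x _
    by_cases hx : x ∈ R
    · simp [hx, h x hx]
    · simp [hx]
  rw [this]

-- ---- the per-round dict characterisation is preserved ----

theorem pvChar_step (l : List (String × List String)) (S R R' : List String) (k : String)
    (hsub : ∀ x ∈ R', x ∈ R) :
    (((pvChar l S R).filter (fun q => !(q.1 == k))).map (pvF R')).filter
        (fun pr => decide (pr.2 ≠ []))
      = pvChar l (PySem.Set.add S k) R' := by
  have himp : ∀ prods : List String, pvVal R' prods ≠ [] → pvVal R prods ≠ [] := by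
    intro prods hne heq
    rcases List.exists_mem_of_ne_nil _ hne with ⟨x, hx⟩
    have hx' := (pvMem_pvVal R' prods x).1 hx
    have hx2 : x ∈ pvVal R prods := (pvMem_pvVal R prods x).2 ⟨hx'.1, hsub x hx'.2⟩
    rw [heq] at hx2
    exact absurd hx2 (List.not_mem_nil)
  induction l with
  | nil => rfl
  | cons pr t ih =>
    unfold pvChar at ih ⊢
    by_cases hS : pr.1 ∉ S
    · have h1 : (decide (pr.1 ∉ S)) = true := decide_eq_true hS
      rw [pvFilter_cons_pos (fun pr => decide (pr.1 ∉ S)) pr _ h1, List.map_cons]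
      by_cases hvR : pvVal R pr.2 ≠ []
      · have h2 : (decide ((pvF R pr).2 ≠ [])) = true := decide_eq_true hvR
        rw [pvFilter_cons_pos (fun pr => decide (pr.2 ≠ [])) (pvF R pr) _ h2]
        by_cases hk : pr.1 = k
        · have h3 : (!((pvF R pr).1 == k)) = false := by
            simp [pvF_fst, hk]
          have h4 : (decide (pr.1 ∉ PySem.Set.add S k)) = false := by
            simp [PySem.Set.mem_add, hk]
          rw [pvFilter_cons_neg (fun q => !(q.1 == k)) (pvF R pr) _ h3,
            pvFilter_cons_neg (fun pr => decide (pr.1 ∉ PySem.Set.add S k)) pr _ h4]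
          exact ih
        · have h3 : (!((pvF R pr).1 == k)) = true := by
            simp [pvF_fst, hk]
          have h4 : (decide (pr.1 ∉ PySem.Set.add S k)) = true := by
            simp only [PySem.Set.mem_add, decide_eq_true_eq]
            rintro (h | h)
            · exact hS h
            · exact hk h
          rw [pvFilter_cons_pos (fun q => !(q.1 == k)) (pvF R pr) _ h3, List.map_cons,
            pvFilter_cons_pos (fun pr => decide (pr.1 ∉ PySem.Set.add S k)) pr _ h4, List.map_cons]
          have h5 : pvF R' (pvF R pr) = pvF R' pr := by
            show (pr.1, pvVal R' (pvVal R pr.2)) = (pr.1, pvVal R' pr.2)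
            rw [pvVal_pvVal R' R pr.2 hsub]
          rw [h5]
          by_cases hvR' : pvVal R' pr.2 ≠ []
          · have h6 : (decide ((pvF R' pr).2 ≠ [])) = true := decide_eq_true hvR'
            rw [pvFilter_cons_pos (fun pr => decide (pr.2 ≠ [])) (pvF R' pr) _ h6,
              pvFilter_cons_pos (fun pr => decide (pr.2 ≠ [])) (pvF R' pr) _ h6, ih]
          · have h6 : (decide ((pvF R' pr).2 ≠ [])) = false := decide_eq_false hvR'
            rw [pvFilter_cons_neg (fun pr => decide (pr.2 ≠ [])) (pvF R' pr) _ h6,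
              pvFilter_cons_neg (fun pr => decide (pr.2 ≠ [])) (pvF R' pr) _ h6]
            exact ih
      · have h2 : (decide ((pvF R pr).2 ≠ [])) = false := decide_eq_false hvR
        rw [pvFilter_cons_neg (fun pr => decide (pr.2 ≠ [])) (pvF R pr) _ h2]
        by_cases hk : pr.1 = k
        · have h4 : (decide (pr.1 ∉ PySem.Set.add S k)) = false := by
            simp [PySem.Set.mem_add, hk]
          rw [pvFilter_cons_neg (fun pr => decide (pr.1 ∉ PySem.Set.add S k)) pr _ h4]
          exact ih
        · have h4 : (decide (pr.1 ∉ PySem.Set.add S k)) = true := by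
            simp only [PySem.Set.mem_add, decide_eq_true_eq]
            rintro (h | h)
            · exact hS h
            · exact hk h
          have hvR'e : pvVal R' pr.2 = [] := by
            by_contra hne
            exact hvR (himp pr.2 hne)
          have h6 : (decide ((pvF R' pr).2 ≠ [])) = false := by
            apply decide_eq_false
            intro hne
            exact hne hvR'e
          rw [pvFilter_cons_pos (fun pr => decide (pr.1 ∉ PySem.Set.add S k)) pr _ h4, List.map_cons,
            pvFilter_cons_neg (fun pr => decide (pr.2 ≠ [])) (pvF R' pr) _ h6]
          exact ih
    · have h1 : (decide (pr.1 ∉ S)) = false := by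
        simp only [decide_eq_false_iff_not]
        exact fun h => h (not_not.1 hS)
      have h2 : (decide (pr.1 ∉ PySem.Set.add S k)) = false := by
        simp only [decide_eq_false_iff_not]
        intro h
        exact h ((PySem.Set.mem_add S k pr.1).2 (Or.inl (not_not.1 hS)))
      rw [pvFilter_cons_neg (fun pr => decide (pr.1 ∉ S)) pr _ h1,
        pvFilter_cons_neg (fun pr => decide (pr.1 ∉ PySem.Set.add S k)) pr _ h2]
      exact ih

theorem pvInit_items (lista : List String) (dict : List (String × List String))
    (hnd : (dict.map Prod.fst).Nodup) :
    (filtrar_proveedores lista (PySem.Dict.mk dict)).items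
      = pvChar dict PySem.Set.empty (PySem.Set.ofList lista) := by
  rw [pvFiltrar_items lista dict hnd]
  unfold pvChar
  have hfilterS : dict.filter (fun pr => decide (pr.1 ∉ (PySem.Set.empty : PySem.Set String)))
      = dict := by
    apply List.filter_eq_self.2
    intro pr _
    simp [PySem.Set.empty]
  rw [hfilterS]
  congr 1
  apply List.map_congr_left
  intro pr _
  show pvF lista pr = pvF (PySem.Set.ofList lista) pr
  unfold pvF pvVal
  have hfc : pr.2.filter (fun p => decide (p ∈ lista))
      = pr.2.filter (fun p => decide (p ∈ PySem.Set.ofList lista)) := by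
    apply List.filter_congr
    intro x _
    simp [PySem.Set.mem_ofList]
  rw [hfc]

-- ---- B-side: the sorted candidate list ----

theorem pvLtEnt_iff (a b : Int × Int × String × List String) :
    pvLtEnt a b = true ↔ (toLex (a.1, a.2.1) : Int ×ₗ Int) < toLex (b.1, b.2.1) := by
  simp [pvLtEnt, Prod.Lex.lt_iff]

theorem pvInsertCand_perm (e : Int × Int × String × List String) :
    ∀ t, (pvInsertCand e t).Perm (e :: t)
  | [] => List.Perm.refl _
  | x :: t => by
    unfold pvInsertCand
    by_cases h : pvLtEnt x e
    · rw [if_pos h]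
      exact ((pvInsertCand_perm e t).cons x).trans (List.Perm.swap e x t)
    · rw [if_neg h]

theorem pvInsertCand_pairwise (e : Int × Int × String × List String) :
    ∀ t, t.Pairwise (fun a b => pvLtEnt a b = true) →
      (∀ x ∈ t, ¬(x.1 = e.1 ∧ x.2.1 = e.2.1)) →
      (pvInsertCand e t).Pairwise (fun a b => pvLtEnt a b = true)
  | [], _, _ => List.pairwise_singleton _ _
  | x :: t, hpw, hne => by
    rcases List.pairwise_cons.1 hpw with ⟨hx, ht⟩
    unfold pvInsertCand
    by_cases h : pvLtEnt x e
    · rw [if_pos h]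
      refine List.pairwise_cons.2 ⟨?_, pvInsertCand_pairwise e t ht
        (fun y hy => hne y (List.mem_cons_of_mem _ hy))⟩
      intro y hy
      rcases List.mem_cons.1 ((pvInsertCand_perm e t).mem_iff.1 hy) with rfl | hy
      · exact h
      · exact hx y hy
    · rw [if_neg h]
      have hex : pvLtEnt e x = true := by
        rw [pvLtEnt_iff]
        have hxe : ¬ (toLex (x.1, x.2.1) : Int ×ₗ Int) < toLex (e.1, e.2.1) := by
          rw [← pvLtEnt_iff]; simp [h]
        rcases lt_or_eq_of_le (le_of_not_gt hxe) with hlt | heq2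
        · exact hlt
        · exfalso
          have : (e.1, e.2.1) = (x.1, x.2.1) := by
            have := congrArg ofLex heq2
            simpa using this
          exact hne x (List.mem_cons_self) ⟨(Prod.mk.injEq _ _ _ _ ▸ this.symm).1,
            (Prod.mk.injEq _ _ _ _ ▸ this.symm).2⟩
      refine List.pairwise_cons.2 ⟨?_, hpw⟩
      intro y hy
      rcases List.mem_cons.1 hy with hy | hy
      · rw [hy]; exact hex
      · have hxy := hx y hy
        rw [pvLtEnt_iff] at hex hxy ⊢
        exact lt_trans hex hxy

-- the loop invariant for B's candidate list
def pvEntInv (l : List (String × List String)) (lista S R : List String)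
    (e : Int × Int × String × List String) : Prop :=
  ∃ (j : Nat) (prods : List String), e.2.1 = (j : Int) ∧ l[j]? = some (e.2.2.1, prods) ∧
    e.2.2.2 = pvVal lista prods ∧ e.2.2.1 ∉ S ∧
    1 ≤ -e.1 ∧ ((pvVal R prods).length : Int) ≤ -e.1

def pvCInv (l : List (String × List String)) (lista S R : List String)
    (C : List (Int × Int × String × List String)) : Prop :=
  (∀ e ∈ C, pvEntInv l lista S R e) ∧
  C.Pairwise (fun a b => pvLtEnt a b = true) ∧
  (C.map (fun e => e.2.1)).Nodup ∧
  (∀ x ∈ R, ∃ e ∈ C, x ∈ e.2.2.2) ∧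
  (∀ (j : Nat) (h : j < l.length), l[j].1 ∉ S → pvVal R l[j].2 ≠ [] →
     ∃ e ∈ C, e.2.1 = (j : Int))

-- the head of the sorted candidate list is A's first strict maximum
theorem pvScan_select (l : List (String × List String)) (S R : List String)
    (jstar : Nat) (hjl : jstar < l.length) (cstar : Nat) (hc : 1 ≤ cstar)
    (hjS : l[jstar].1 ∉ S)
    (hjc : (pvVal R l[jstar].2).length = cstar)
    (hlt : ∀ (j : Nat), (h : j < l.length) → j < jstar → l[j].1 ∉ S →
        (pvVal R l[j].2).length < cstar)
    (hle : ∀ (j : Nat), (h : j < l.length) → jstar < j → l[j].1 ∉ S →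
        (pvVal R l[j].2).length ≤ cstar) :
    pvScan ((l.filter (fun pr => decide (pr.1 ∉ S))).map
        (fun pr => (pr.1, (pvVal R pr.2).length))) (none, 0)
      = (some l[jstar].1, cstar) := by
  have hsplit : l = l.take jstar ++ l[jstar] :: l.drop (jstar + 1) := by
    conv_lhs => rw [← List.take_append_drop jstar l]
    rw [List.drop_eq_getElem_cons hjl]
  conv_lhs => rw [hsplit]
  rw [List.filter_append]
  rw [pvFilter_cons_pos (fun pr => decide (pr.1 ∉ S)) (l[jstar]'hjl) (l.drop (jstar + 1))
    (decide_eq_true hjS)]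
  rw [List.map_append, List.map_cons, hjc]
  apply pvScan_first_max
  · intro q hq
    rcases List.mem_map.1 hq with ⟨pr, hpr, hq⟩
    rcases List.mem_filter.1 hpr with ⟨hprt, hprS⟩
    rcases List.mem_iff_getElem.1 hprt with ⟨i, hi, hie⟩
    have hil : i < l.length := lt_of_lt_of_le hi (by simp [List.length_take])
    have hijs : i < jstar := lt_of_lt_of_le hi (by simp [List.length_take])
    have hpri : l[i] = pr := by rw [← List.getElem_take (h := hi)]; exact hie
    have := hlt i hil hijs (by rw [hpri]; exact of_decide_eq_true hprS)
    rw [← hq, hpri] at *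
    simpa using this
  · exact hc
  · intro q hq
    rcases List.mem_map.1 hq with ⟨pr, hpr, hq⟩
    rcases List.mem_filter.1 hpr with ⟨hprt, hprS⟩
    rcases List.mem_iff_getElem.1 hprt with ⟨i, hi, hie⟩
    have hil : jstar + 1 + i < l.length := by
      have := hi
      simp only [List.length_drop] at this
      omega
    have hpri : l[jstar + 1 + i] = pr := by
      rw [← List.getElem_drop (h := hi)]; exact hie
    have := hle (jstar + 1 + i) hil (by omega) (by rw [hpri]; exact of_decide_eq_true hprS)
    rw [← hq, hpri] at *
    simpa using this

-- ===== the main simulation =====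

theorem pvMainB : ∀ (fB fA : Nat) (l : List (String × List String))
    (lista S R : List String) (C : List (Int × Int × String × List String))
    (d : PySem.Dict String (List String)),
    (l.map Prod.fst).Nodup → R.Nodup → (∀ x ∈ R, x ∈ lista) →
    pvCInv l lista S R C → d.items = pvChar l S R →
    R.length < fA →
    (C.map (fun e => (-e.1).toNat)).sum + R.length < fB →
    elegirA_loop fA S R d = elegirB_loop fB C S R := by
  intro fB
  induction fB with
  | zero => intro fA l lista S R C d _ _ _ _ _ _ hfB; omega
  | succ fB ih =>
    intro fA l lista S R C d hk hRn hRl hCI hd hfA hfB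
    obtain ⟨fA', rfl⟩ : ∃ fA', fA = fA' + 1 := ⟨fA - 1, by omega⟩
    by_cases hR : R = []
    · subst hR
      simp [elegirA_loop, elegirB_loop, List.isEmpty_nil]
    · have hRlen : R.length > 0 := List.length_pos_iff.2 hR
      have hRE : R.isEmpty = false := by
        cases R with
        | nil => exact absurd rfl hR
        | cons a t => rfl
      obtain ⟨hEnt, hpw, hnidx, hcov, hpres⟩ := hCI
      cases C with
      | nil =>
        exfalso
        rcases List.exists_mem_of_ne_nil _ hR with ⟨x, hx⟩
        rcases hcov x hx with ⟨e, he, _⟩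
        exact absurd he (List.not_mem_nil)
      | cons e₀ rest =>
        -- unfold one B step
        have hBstep : elegirB_loop (fB + 1) (e₀ :: rest) S R =
            (let actual := (e₀.2.2.2.filter (fun p => PySem.Set.contains R p)).length
             if (actual : Int) = -e₀.1 then
               elegirB_loop fB rest (PySem.Set.add S e₀.2.2.1) (PySem.Set.diff R e₀.2.2.2)
             else if 0 < actual then
               elegirB_loop fB (pvInsertCand (-(actual : Int), e₀.2.1, e₀.2.2.1, e₀.2.2.2) rest) S R
             else
               elegirB_loop fB rest S R) := by
          simp only [elegirB_loop, hRE]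
          rfl
        rw [hBstep]
        simp only []
        set actual := (e₀.2.2.2.filter (fun p => PySem.Set.contains R p)).length with hactdef
        -- facts about the head entry
        rcases hEnt e₀ (List.mem_cons_self) with
          ⟨jstar, prods0, hidx0, hget0, hof0, hS0, hst1, hstb⟩
        have hjl : jstar < l.length := (List.getElem?_eq_some_iff.1 hget0).1
        have hpair : l[jstar] = (e₀.2.2.1, prods0) := (List.getElem?_eq_some_iff.1 hget0).2
        have hactual : actual = (pvVal R prods0).length := by
          rw [hactdef, hof0, ← List.countP_eq_length_filter]
          exact pvCount lista R prods0 hRl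
        by_cases hsel : (actual : Int) = -e₀.1
        · -- SELECT: the head's stored count is current; it is A's first strict max
          rw [if_pos hsel]
          have hc1 : 1 ≤ actual := by omega
          -- bound every other unchosen provider through its candidate entry
          have hkey : ∀ (j : Nat), (h : j < l.length) → j ≠ jstar → l[j].1 ∉ S →
              (pvVal R l[j].2).length < actual ∨
              ((pvVal R l[j].2).length ≤ actual ∧ jstar < j) := by
            intro j hj hne hjS
            by_cases hz : pvVal R l[j].2 = []
            · left; rw [hz]; simpa using hc1
            · rcases hpres j hj hjS hz with ⟨e, heC, heidx⟩
              have herest : e ∈ rest := by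
                rcases List.mem_cons.1 heC with he0 | he
                · exfalso
                  rw [he0, hidx0] at heidx
                  exact hne (by exact_mod_cast heidx.symm)
                · exact he
              have hlt0 : pvLtEnt e₀ e = true :=
                (List.pairwise_cons.1 hpw).1 e herest
              rcases hEnt e heC with ⟨j', prods', hidx', hget', _, _, _, hstb'⟩
              have hjj : j' = j := by
                rw [hidx'] at heidx
                exact_mod_cast heidx
              subst hjj
              have hpair' : l[j'] = (e.2.2.1, prods') := (List.getElem?_eq_some_iff.1 hget').2
              have hprods' : l[j'].2 = prods' := by rw [hpair']
              rw [hprods']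
              have hlte := (pvLtEnt_iff e₀ e).1 hlt0
              rw [Prod.Lex.lt_iff] at hlte
              simp only [ofLex_toLex] at hlte
              rcases hlte with hlt1 | ⟨heq1, hlt2⟩
              · left
                have : -e.1 < actual := by omega
                omega
              · right
                constructor
                · have : -e.1 = (actual : Int) := by omega
                  omega
                · rw [hidx0, hidx'] at hlt2
                  exact_mod_cast hlt2
          have hscan : pvScan ((l.filter (fun pr => decide (pr.1 ∉ S))).map
              (fun pr => (pr.1, (pvVal R pr.2).length))) (none, 0)
              = (some l[jstar].1, actual) := by
            apply pvScan_select l S R jstar hjl actual hc1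
            · rw [hpair]; exact hS0
            · rw [hpair]; exact hactual.symm
            · intro j hj hjlt hjS
              rcases hkey j hj (by omega) hjS with h | ⟨_, h⟩
              · exact h
              · omega
            · intro j hj hjgt hjS
              rcases hkey j hj (by omega) hjS with h | ⟨h, _⟩
              · omega
              · exact h
          -- A's fold over d.items computes the same scan
          have hYlist : d.items.map (fun pr => (pr.1, pr.2.length))
              = ((l.filter (fun pr => decide (pr.1 ∉ S))).filter
                  ((fun pr => decide (pr.2 ≠ [])) ∘ pvF R)).map
                  ((fun pr => (pr.1, pr.2.length)) ∘ pvF R) := by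
            rw [hd]
            unfold pvChar
            rw [List.filter_map, List.map_map]
          have hskip := pvScan_skip ((fun pr => decide (pr.2 ≠ [])) ∘ pvF R)
              ((fun pr => (pr.1, pr.2.length)) ∘ pvF R)
              (l.filter (fun pr => decide (pr.1 ∉ S)))
              (by
                intro pr _ hq
                show (pvF R pr).2.length = 0
                have hq' : ¬ ((pvF R pr).2 ≠ []) := of_decide_eq_false hq
                have hq2 : (pvF R pr).2 = [] := not_not.1 hq'
                rw [hq2]
                rfl)
              (none, 0)
          have hmapeq : (l.filter (fun pr => decide (pr.1 ∉ S))).map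
              ((fun pr => (pr.1, pr.2.length)) ∘ pvF R)
              = (l.filter (fun pr => decide (pr.1 ∉ S))).map
                (fun pr => (pr.1, (pvVal R pr.2).length)) := rfl
          have hAscan : ((d.items.foldl (fun (st : Option String × List String) pr =>
                if pr.2.length > st.2.length then (some pr.1, pr.2) else st) (none, PySem.Set.empty)).1,
              (d.items.foldl (fun (st : Option String × List String) pr =>
                if pr.2.length > st.2.length then (some pr.1, pr.2) else st) (none, PySem.Set.empty)).2.length)
              = (some l[jstar].1, actual) := by
            have h0 := pvFoldA_proj d.items none PySem.Set.empty
            rw [hYlist] at h0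
            rw [h0]
            rw [show (PySem.Set.empty : PySem.Set String).length = 0 from rfl]
            rw [hskip, hmapeq, hscan]
          have hmass : mas_importante d = some l[jstar].1 := by
            unfold mas_importante
            exact congrArg Prod.fst hAscan
          have hvalne : pvVal R prods0 ≠ [] := by
            intro h0
            rw [h0] at hactual
            simp at hactual
            omega
          have hmem : (l[jstar].1, pvVal R prods0) ∈ d.items := by
            rw [hd]
            unfold pvChar
            apply List.mem_filter.2
            refine ⟨List.mem_map.2 ⟨l[jstar], List.mem_filter.2
              ⟨List.getElem_mem hjl, decide_eq_true (by rw [hpair]; exact hS0)⟩, ?_⟩,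
              decide_eq_true (by simpa using hvalne)⟩
            show (l[jstar].1, pvVal R l[jstar].2) = (l[jstar].1, pvVal R prods0)
            rw [hpair]
          have hdk : d.keys.Nodup := by
            have hkeq : d.keys = d.items.map Prod.fst := rfl
            rw [hkeq, hd]
            exact pvChar_keys_nodup l S R hk
          have hget : d.get? l[jstar].1 = some (pvVal R prods0) :=
            PySem.Dict.get?_of_mem_items d hmem hdk
          -- unfold one A step
          conv_lhs => rw [show elegirA_loop (fA' + 1) S R d =
            (if R.length > 0 then
              match mas_importante d with
              | none => S
              | some proveedor =>
                match d.get? proveedor with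
                | none => PySem.Set.add S proveedor
                | some cubiertos =>
                  elegirA_loop fA' (PySem.Set.add S proveedor)
                    (PySem.Set.diff R cubiertos)
                    (filtrar_proveedores (PySem.Set.diff R cubiertos) (d.erase proveedor))
            else S) from rfl]
          rw [if_pos hRlen]
          simp only [hmass, hget]
          -- both sides now recurse on the same state
          have hname : e₀.2.2.1 = l[jstar].1 := by rw [hpair]
          have hdiff : PySem.Set.diff R e₀.2.2.2 = PySem.Set.diff R (pvVal R prods0) := by
            rw [hof0]
            unfold PySem.Set.diff
            apply List.filter_congr
            intro x hx
            have hiff : (x ∈ pvVal lista prods0) ↔ (x ∈ pvVal R prods0) := by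
              rw [pvMem_pvVal, pvMem_pvVal]
              constructor
              · rintro ⟨h1, _⟩; exact ⟨h1, hx⟩
              · rintro ⟨h1, _⟩; exact ⟨h1, hRl x hx⟩
            simp [hiff]
          rw [hname, hdiff]
          set R' := PySem.Set.diff R (pvVal R prods0) with hR'
          have hR'sub : ∀ x ∈ R', x ∈ R := fun x hx => ((PySem.Set.mem_diff _ _ x).1 hx).1
          have hR'lt : R'.length < R.length := by
            rcases List.exists_mem_of_ne_nil _ hvalne with ⟨y, hy⟩
            have hyR : y ∈ R := ((pvMem_pvVal R prods0 y).1 hy).2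
            exact pvFilter_lt R _ y hyR (by simp [hy])
          -- the next dict
          have hnd2 : ((d.items.filter (fun q => !(q.1 == l[jstar].1))).map Prod.fst).Nodup := by
            have hsub2 : ((d.items.filter (fun q => !(q.1 == l[jstar].1))).map Prod.fst).Sublist
                (d.items.map Prod.fst) := (List.filter_sublist).map Prod.fst
            have hnd3 : (d.items.map Prod.fst).Nodup := by
              rw [hd]
              exact pvChar_keys_nodup l S R hk
            exact hnd3.sublist hsub2
          have herase : (d.erase l[jstar].1)
              = PySem.Dict.mk (d.items.filter (fun q => !(q.1 == l[jstar].1))) := rfl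
          have hd' : (filtrar_proveedores R' (d.erase l[jstar].1)).items
              = pvChar l (PySem.Set.add S l[jstar].1) R' := by
            rw [herase, pvFiltrar_items _ _ hnd2, hd, pvChar_step l S R R' l[jstar].1 hR'sub]
          -- the invariant for the next round
          have hCI' : pvCInv l lista (PySem.Set.add S l[jstar].1) R' rest := by
            have hidxne : ∀ e ∈ rest, e.2.1 ≠ e₀.2.1 := by
              intro e he heq
              have : e₀.2.1 ∈ rest.map (fun e => e.2.1) :=
                List.mem_map.2 ⟨e, he, heq⟩
              exact (List.nodup_cons.1 hnidx).1 this
            refine ⟨?_, (List.pairwise_cons.1 hpw).2, (List.nodup_cons.1 hnidx).2, ?_, ?_⟩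
            · intro e he
              rcases hEnt e (List.mem_cons_of_mem _ he) with
                ⟨j, prods, hidx, hget', hof, hS, h1, hb⟩
              refine ⟨j, prods, hidx, hget', hof, ?_, h1, ?_⟩
              · intro hmem
                rcases (PySem.Set.mem_add _ _ _).1 hmem with hmem | hmem
                · exact hS hmem
                · -- e's name equals the chosen name: impossible, distinct positions
                  have hjne : j ≠ jstar := by
                    intro hjj
                    apply hidxne e he
                    rw [hidx, hidx0, hjj]
                  have hj : j < l.length := (List.getElem?_eq_some_iff.1 hget').1
                  have hpair' : l[j] = (e.2.2.1, prods) := (List.getElem?_eq_some_iff.1 hget').2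
                  have hfst : l[j].1 = l[jstar].1 := by rw [hpair']; exact hmem
                  have hmn : (l.map Prod.fst)[j]'(by simpa using hj)
                      = (l.map Prod.fst)[jstar]'(by simpa using hjl) := by
                    simp only [List.getElem_map]
                    exact hfst
                  exact hjne (hk.getElem_inj_iff.1 hmn)
              · calc ((pvVal R' prods).length : Int)
                    ≤ ((pvVal R prods).length : Int) := by
                      exact_mod_cast pvVal_len_mono R' R prods hR'sub
                  _ ≤ -e.1 := hb
            · intro x hx
              rcases hcov x (hR'sub x hx) with ⟨e, heC, hxe⟩
              rcases List.mem_cons.1 heC with he0 | he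
              · exfalso
                rw [he0, hof0] at hxe
                have hxval : x ∈ pvVal R prods0 := (pvMem_pvVal R prods0 x).2
                  ⟨((pvMem_pvVal lista prods0 x).1 hxe).1, hR'sub x hx⟩
                exact ((PySem.Set.mem_diff _ _ x).1 hx).2 hxval
              · exact ⟨e, he, hxe⟩
            · intro j hj hS' hnz
              have hjS : l[j].1 ∉ S := fun hmem => hS' ((PySem.Set.mem_add _ _ _).2 (Or.inl hmem))
              have hnzR : pvVal R l[j].2 ≠ [] := fun h0 => hnz (pvVal_nil_mono R' R _ hR'sub h0)
              rcases hpres j hj hjS hnzR with ⟨e, heC, heidx⟩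
              rcases List.mem_cons.1 heC with he0 | he
              · exfalso
                rw [he0, hidx0] at heidx
                have : j = jstar := by exact_mod_cast heidx.symm
                subst this
                exact hS' ((PySem.Set.mem_add _ _ _).2 (Or.inr rfl))
              · exact ⟨e, he, heidx⟩
          exact ih fA' l lista (PySem.Set.add S l[jstar].1) R' rest
            (filtrar_proveedores R' (d.erase l[jstar].1)) hk
            (PySem.Set.nodup_diff R _ hRn) (fun x hx => hRl x (hR'sub x hx)) hCI' hd'
            (by omega)
            (by
              have : (rest.map (fun e => (-e.1).toNat)).sum + (-e₀.1).toNat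
                  = ((e₀ :: rest).map (fun e => (-e.1).toNat)).sum := by
                simp [Nat.add_comm]
              omega)
        · rw [if_neg hsel]
          have hle0 : (actual : Int) ≤ -e₀.1 := by rw [hactual]; exact hstb
          have hstale : (actual : Int) < -e₀.1 := by
            rcases lt_or_eq_of_le hle0 with h | h
            · exact h
            · exact absurd h hsel
          by_cases hpos : 0 < actual
          · -- STALE: reinsert the refreshed entry; A's side is untouched
            rw [if_pos hpos]
            set newe : Int × Int × String × List String :=
              (-(actual : Int), e₀.2.1, e₀.2.2.1, e₀.2.2.2) with hnewe
            have hpermC : (pvInsertCand newe rest).Perm (newe :: rest) := pvInsertCand_perm _ _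
            have hidxne : ∀ e ∈ rest, e.2.1 ≠ e₀.2.1 := by
              intro e he heq
              exact (List.nodup_cons.1 hnidx).1 (List.mem_map.2 ⟨e, he, heq⟩)
            have hCI' : pvCInv l lista S R (pvInsertCand newe rest) := by
              refine ⟨?_, ?_, ?_, ?_, ?_⟩
              · intro e he
                rcases List.mem_cons.1 (hpermC.mem_iff.1 he) with rfl | he
                · refine ⟨jstar, prods0, hidx0, hget0, hof0, hS0, ?_, ?_⟩
                  · simp only [hnewe]; omega
                  · simp only [hnewe]; omega
                · exact hEnt e (List.mem_cons_of_mem _ he)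
              · apply pvInsertCand_pairwise newe rest (List.pairwise_cons.1 hpw).2
                intro x hx hxe
                exact hidxne x hx (by simpa [hnewe] using hxe.2)
              · have hpm : ((pvInsertCand newe rest).map (fun e => e.2.1)).Perm
                    ((newe :: rest).map (fun e => e.2.1)) := hpermC.map _
                apply hpm.nodup_iff.2
                simpa [hnewe] using hnidx
              · intro x hx
                rcases hcov x hx with ⟨e, heC, hxe⟩
                rcases List.mem_cons.1 heC with he0 | he
                · exact ⟨newe, hpermC.mem_iff.2 (List.mem_cons.2 (Or.inl rfl)), by
                    simp only [hnewe]
                    rw [he0] at hxe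
                    exact hxe⟩
                · exact ⟨e, hpermC.mem_iff.2 (List.mem_cons.2 (Or.inr he)), hxe⟩
              · intro j hj hjS hnz
                rcases hpres j hj hjS hnz with ⟨e, heC, heidx⟩
                rcases List.mem_cons.1 heC with he0 | he
                · exact ⟨newe, hpermC.mem_iff.2 (List.mem_cons.2 (Or.inl rfl)), by
                    simp only [hnewe]
                    rw [← he0]
                    exact heidx⟩
                · exact ⟨e, hpermC.mem_iff.2 (List.mem_cons.2 (Or.inr he)), heidx⟩
            apply ih (fA' + 1) l lista S R _ d hk hRn hRl hCI' hd hfA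
            have hsum : ((pvInsertCand newe rest).map (fun e => (-e.1).toNat)).sum
                = (-newe.1).toNat + (rest.map (fun e => (-e.1).toNat)).sum := by
              have := (hpermC.map (fun e => (-e.1).toNat)).sum_eq
              simpa using this
            have hsum0 : ((e₀ :: rest).map (fun e => (-e.1).toNat)).sum
                = (-e₀.1).toNat + (rest.map (fun e => (-e.1).toNat)).sum := by simp
            have hlt : (-newe.1).toNat < (-e₀.1).toNat := by
              simp only [hnewe]
              omega
            omega
          · -- DROP: the head covers nothing any more
            rw [if_neg hpos]
            have hact0 : actual = 0 := by omega
            have hval0 : pvVal R prods0 = [] := by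
              rw [hactual] at hact0
              exact List.length_eq_zero_iff.1 hact0
            have hCI' : pvCInv l lista S R rest := by
              refine ⟨fun e he => hEnt e (List.mem_cons_of_mem _ he),
                (List.pairwise_cons.1 hpw).2, (List.nodup_cons.1 hnidx).2, ?_, ?_⟩
              · intro x hx
                rcases hcov x hx with ⟨e, heC, hxe⟩
                rcases List.mem_cons.1 heC with he0 | he
                · exfalso
                  rw [he0, hof0] at hxe
                  have : x ∈ pvVal R prods0 := (pvMem_pvVal R prods0 x).2
                    ⟨((pvMem_pvVal lista prods0 x).1 hxe).1, hx⟩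
                  rw [hval0] at this
                  exact absurd this (List.not_mem_nil)
                · exact ⟨e, he, hxe⟩
              · intro j hj hjS hnz
                rcases hpres j hj hjS hnz with ⟨e, heC, heidx⟩
                rcases List.mem_cons.1 heC with he0 | he
                · exfalso
                  rw [he0, hidx0] at heidx
                  have : j = jstar := by exact_mod_cast heidx.symm
                  subst this
                  have : l[j].2 = prods0 := by rw [hpair]
                  rw [this] at hnz
                  exact hnz hval0
                · exact ⟨e, he, heidx⟩
            apply ih (fA' + 1) l lista S R rest d hk hRn hRl hCI' hd hfA
            have hsum0 : ((e₀ :: rest).map (fun e => (-e.1).toNat)).sum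
                = (-e₀.1).toNat + (rest.map (fun e => (-e.1).toNat)).sum := by simp
            omega

-- ===== VERDICT (by name: the statement is the Claim_ definition above) =====
theorem elegir_proveedores_spec : Claim_equal_elegir_proveedores := by
  intro lista dict _ hpre
  unfold Spec_elegir_proveedores
  show elegir_proveedores lista dict = elegir_proveedores_alt lista dict
  unfold elegir_proveedores elegir_proveedores_alt
  simp only []
  -- the initial candidate list
  have hOferta : ∀ prods : List String,
      PySem.Set.ofList (prods.filter (fun p => PySem.Set.contains (PySem.Set.ofList lista) p))
        = pvVal lista prods := by
    intro prods
    unfold pvVal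
    congr 1
    apply List.filter_congr
    intro x _
    rw [PySem.Set.contains_eq_decide]
    simp [PySem.Set.mem_ofList]
  have hstep : (fun (acc : List (Int × Int × String × List String))
        (pr : Int × String × List String) =>
      if PySem.Set.ofList (pr.2.2.filter (fun p => PySem.Set.contains (PySem.Set.ofList lista) p)) ≠ [] then
        acc ++ [(-(((PySem.Set.ofList (pr.2.2.filter (fun p => PySem.Set.contains (PySem.Set.ofList lista) p))).length : Int)),
                 pr.1, pr.2.1,
                 PySem.Set.ofList (pr.2.2.filter (fun p => PySem.Set.contains (PySem.Set.ofList lista) p)))]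
      else acc)
      = (fun acc pr =>
        if pvVal lista pr.2.2 ≠ [] then
          acc ++ [(-(((pvVal lista pr.2.2).length : Int)), pr.1, pr.2.1, pvVal lista pr.2.2)]
        else acc) := by
    funext acc pr
    rw [hOferta pr.2.2]
  rw [hstep]
  have hc0 : (PySem.List.enumerate (PySem.Dict.mk dict).items 0).foldl
      (fun acc pr =>
        if pvVal lista pr.2.2 ≠ [] then
          acc ++ [(-(((pvVal lista pr.2.2).length : Int)), pr.1, pr.2.1, pvVal lista pr.2.2)]
        else acc) []
      = ((PySem.List.enumerate dict 0).filter (fun pr => decide (pvVal lista pr.2.2 ≠ []))).map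
          (fun pr => (-(((pvVal lista pr.2.2).length : Int)), pr.1, pr.2.1, pvVal lista pr.2.2)) := by
    have h := PySem.List.foldl_append_if (fun pr : Int × String × List String => decide (pvVal lista pr.2.2 ≠ []))
      (fun pr => (-(((pvVal lista pr.2.2).length : Int)), pr.1, pr.2.1, pvVal lista pr.2.2))
      (PySem.List.enumerate dict 0) []
    simp only [decide_eq_true_eq] at h
    exact h
  rw [hc0]
  set cand0 := ((PySem.List.enumerate dict 0).filter (fun pr => decide (pvVal lista pr.2.2 ≠ []))).map
      (fun pr => (-(((pvVal lista pr.2.2).length : Int)), pr.1, pr.2.1, pvVal lista pr.2.2)) with hcand0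
  set cand := PySem.List.sorted cand0 (fun e => (toLex (e.1, e.2.1) : Int ×ₗ Int)) false with hcand
  have hperm : cand.Perm cand0 := PySem.List.sorted_perm cand0 _ false
  -- invariant pieces of the initial sorted candidate list
  have hpw0 : cand0.Pairwise (fun a b => a.2.1 < b.2.1) := by
    rw [hcand0]
    apply List.pairwise_map.2
    apply List.Pairwise.imp (fun {a b} h => h)
    exact ((PySem.List.pairwise_lt_enumerate dict 0).filter _)
  have hnidx0 : (cand0.map (fun e => e.2.1)).Nodup := by
    apply List.pairwise_map.2
    exact hpw0.imp (fun {a b} h => ne_of_lt h)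
  have hnidx : (cand.map (fun e => e.2.1)).Nodup :=
    ((hperm.map _).nodup_iff).2 hnidx0
  have hkeynd : (cand.map (fun e => (toLex (e.1, e.2.1) : Int ×ₗ Int))).Nodup := by
    apply ((hperm.map _).nodup_iff).2
    apply List.pairwise_map.2
    apply hpw0.imp
    intro a b h heq
    have := congrArg ofLex heq
    simp only [ofLex_toLex] at this
    exact absurd (congrArg Prod.snd this) (ne_of_lt h)
  have hpwlt : cand.Pairwise (fun a b => pvLtEnt a b = true) := by
    have hle : cand.Pairwise (fun a b =>
        (toLex (a.1, a.2.1) : Int ×ₗ Int) ≤ toLex (b.1, b.2.1)) :=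
      PySem.List.sorted_pairwise cand0 _
    have hne : cand.Pairwise (fun a b =>
        (toLex (a.1, a.2.1) : Int ×ₗ Int) ≠ toLex (b.1, b.2.1)) :=
      List.pairwise_map.1 hkeynd
    exact (hle.and hne).imp (fun {a b} h => (pvLtEnt_iff a b).2 (lt_of_le_of_ne h.1 h.2))
  have hValOf : ∀ prods : List String,
      pvVal (PySem.Set.ofList lista) prods = pvVal lista prods := by
    intro prods
    unfold pvVal
    congr 1
    apply List.filter_congr
    intro x _
    simp [PySem.Set.mem_ofList]
  have hmemc : ∀ (j : Nat), (h : j < dict.length) → pvVal lista dict[j].2 ≠ [] →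
      (-(((pvVal lista dict[j].2).length : Int)), (j : Int), dict[j].1, pvVal lista dict[j].2) ∈ cand := by
    intro j hj hnz
    apply hperm.mem_iff.2
    rw [hcand0]
    apply List.mem_map.2
    refine ⟨((j : Int), dict[j]), List.mem_filter.2
      ⟨(PySem.List.mem_enumerate_iff dict 0 _).2 ⟨j, hj, by simp⟩, decide_eq_true hnz⟩, rfl⟩
  have hCI : pvCInv dict lista PySem.Set.empty (PySem.Set.ofList lista) cand := by
    refine ⟨?_, hpwlt, hnidx, ?_, ?_⟩
    · intro e he
      rcases List.mem_map.1 (hperm.mem_iff.1 he) with ⟨pr, hpr, hee⟩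
      rcases List.mem_filter.1 hpr with ⟨hprm, hprnz⟩
      rcases (PySem.List.mem_enumerate_iff dict 0 pr).1 hprm with ⟨k, hk, hpre2⟩
      have hnz : pvVal lista pr.2.2 ≠ [] := of_decide_eq_true hprnz
      refine ⟨k, pr.2.2, ?_, ?_, ?_, ?_, ?_, ?_⟩
      · rw [← hee]; rw [hpre2]; simp
      · rw [← hee]
        simp only []
        rw [List.getElem?_eq_some_iff]
        refine ⟨hk, ?_⟩
        have : pr.2 = dict[k] := by rw [hpre2]
        rw [this]
      · rw [← hee]
      · rw [← hee]; simp [PySem.Set.empty]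
      · rw [← hee]
        simp only []
        have : 0 < (pvVal lista pr.2.2).length := List.length_pos_iff.2 hnz
        omega
      · rw [← hee]
        simp only []
        rw [hValOf pr.2.2]
        omega
    · intro x hx
      have hxl : x ∈ lista := (PySem.Set.mem_ofList lista x).1 hx
      rcases hpre.2 x hxl with ⟨pr, hprd, hxpr⟩
      rcases List.mem_iff_getElem.1 hprd with ⟨j, hj, hje⟩
      have hxval : x ∈ pvVal lista dict[j].2 :=
        (pvMem_pvVal lista _ x).2 ⟨by rw [hje]; exact hxpr, hxl⟩
      have hnz : pvVal lista dict[j].2 ≠ [] := fun h0 => by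
        rw [h0] at hxval; exact absurd hxval (List.not_mem_nil)
      exact ⟨_, hmemc j hj hnz, hxval⟩
    · intro j hj _ hnz
      have hnz' : pvVal lista dict[j].2 ≠ [] := by
        intro h0
        exact hnz (by rw [hValOf] at *; exact h0)
      exact ⟨_, hmemc j hj hnz', by simp⟩
  have hd0 : (filtrar_proveedores lista (PySem.Dict.mk dict)).items
      = pvChar dict PySem.Set.empty (PySem.Set.ofList lista) := pvInit_items lista dict hpre.1
  exact pvMainB ((cand.map (fun e => (-e.1).toNat)).sum + (PySem.Set.ofList lista).length + 1)
    ((PySem.Set.ofList lista).length + 1) dict lista PySem.Set.empty (PySem.Set.ofList lista)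
    cand (filtrar_proveedores lista (PySem.Dict.mk dict)) hpre.1
    (PySem.Set.nodup_ofList lista) (fun x hx => (PySem.Set.mem_ofList lista x).1 hx)
    hCI hd0 (Nat.lt_succ_self _) (Nat.lt_succ_self _)
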